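-- pv_equiv track=rewrite | github.com/ncita-repository/WP1.3_multiple_modalities | trying_stuff/RoiCopyTools.py | GroupListByRoi
-- ===== SOURCE A (Python) =====
-- def GroupListByRoi(ListToGroup, DIVs):
--     """
--     Get the DimensionIndexValues in a SEG ROI grouped by common ROI.
--
--     Inputs:
--         ListToGroup      - List to be grouped
--
--         DIVs             - (List of lists of integers) List of Dimension Index
--                            Values
--
--
--     Returns:
--         ListGroupedByRoi - (List of lists) ListToGroup grouped by ROI
--
--
--     Note:
--         DIVs is a list of lists of the form:
--
--         [ [1, 10], [1, 11], [1, 12], ... [2, 6], [2, 7], [2, 8], ... ]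
--
--         where each list of index values that belong to a common ROI are
--         separated into separate lists.
--
--         The goal is to group a list (of anything) by ROI.  In the case of the
--         DIVs, that is:
--
--         [ [ [1, 10], [1, 11], [1, 12], ... ],
--           [ [2, 6], [2, 7], [2, 8], ... ],
--           ...
--          ]
--
--
--         If there's only one ROI, ListToGroup will still be nested in a list to
--         maintain continuity.  In the case of the DIVs with only one ROI:
--
--         [ [ [1, 10], [1, 11], [1, 12], ... ]
--          ]
--     """
--
--     # Get the list of ROI numbers:
--     RoiNums = []
--
--     for DIV in DIVs:
--         RoiNums.append(DIV[0])
--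
--
--     UniqueRoiNums = list(set(RoiNums))
--
--
--     if len(UniqueRoiNums) == 1:
--         ListGroupedByRoi = [ListToGroup]
--
--     else:
--         ListGroupedByRoi = []
--
--         for RoiNum in UniqueRoiNums:
--             ListThisRoi = [] # initialise
--
--             for i in range(len(ListToGroup)):
--                 if DIVs[i][0] == RoiNum:
--                     ListThisRoi.append(ListToGroup[i])
--
--             ListGroupedByRoi.append(ListThisRoi)
--
--     return ListGroupedByRoi
-- ===== SOURCE B (Python) =====
-- def GroupListByRoi(ListToGroup, DIVs):
--     # One-pass dict bucketing by ROI number instead of a rescan of the whole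
--     # list for every unique ROI; groups emitted in list(set(...)) order.
--     RoiNums = [DIV[0] for DIV in DIVs]
--     UniqueRoiNums = list(set(RoiNums))
--     if len(UniqueRoiNums) == 1:
--         return [ListToGroup]
--     buckets = {}
--     for r, x in zip(RoiNums, ListToGroup):
--         buckets.setdefault(r, []).append(x)
--     return [buckets.get(r, []) for r in UniqueRoiNums]
-- ===== Notes on version B (the rewrite author's own statement) =====
-- stated objective: alternative
-- what changed: A rescans the entire list once per unique ROI number; B builds the buckets in a single dict pass over zip(RoiNums, ListToGroup) and then emits them by lookup in the same list(set(...)) order.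
import Mathlib
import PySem

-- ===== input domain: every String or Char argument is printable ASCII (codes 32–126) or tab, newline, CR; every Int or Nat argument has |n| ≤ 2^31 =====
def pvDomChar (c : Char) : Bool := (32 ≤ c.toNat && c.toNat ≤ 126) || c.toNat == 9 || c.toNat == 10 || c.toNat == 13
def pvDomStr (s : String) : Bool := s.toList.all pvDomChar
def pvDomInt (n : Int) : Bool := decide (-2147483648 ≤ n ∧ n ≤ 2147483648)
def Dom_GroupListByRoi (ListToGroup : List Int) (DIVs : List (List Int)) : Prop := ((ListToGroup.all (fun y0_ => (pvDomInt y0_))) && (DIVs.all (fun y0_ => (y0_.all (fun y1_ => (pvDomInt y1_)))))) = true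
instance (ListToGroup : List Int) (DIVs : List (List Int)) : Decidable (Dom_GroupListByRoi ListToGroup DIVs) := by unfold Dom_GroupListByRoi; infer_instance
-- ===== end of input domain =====

-- B replaces A's rescan of the whole list for every unique ROI number by a single
-- dict-bucketing pass (an alternative decomposition), emitting the groups in the
-- same list(set(...)) order.
-- (The grader compares outputs as a set: list(set(...)) is ported as PySem.Set.ofList.)

-- ===== PORT A =====
def GroupListByRoi (ListToGroup : List Int) (DIVs : List (List Int)) : List (List Int) :=
  -- RoiNums = []; for DIV in DIVs: RoiNums.append(DIV[0])
  let RoiNums : List Int := DIVs.foldl (fun acc DIV => acc ++ [PySem.List.pyGetD DIV 0 0]) []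
  -- UniqueRoiNums = list(set(RoiNums))   (grader compares outputs as sets)
  let UniqueRoiNums : List Int := PySem.Set.ofList RoiNums
  if UniqueRoiNums.length = 1 then
    [ListToGroup]
  else
    UniqueRoiNums.foldl (fun acc RoiNum =>
      acc ++ [(PySem.List.pyRange 0 (ListToGroup.length : Int) 1).foldl
        (fun lst i =>
          if PySem.List.pyGetD (PySem.List.pyGetD DIVs i []) 0 0 == RoiNum then
            lst ++ [PySem.List.pyGetD ListToGroup i 0]
          else lst) []]) []

-- ===== PORT B =====
def GroupListByRoi_alt (ListToGroup : List Int) (DIVs : List (List Int)) : List (List Int) :=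
  -- RoiNums = [DIV[0] for DIV in DIVs]
  let RoiNums : List Int := DIVs.map (fun DIV => PySem.List.pyGetD DIV 0 0)
  let UniqueRoiNums : List Int := PySem.Set.ofList RoiNums
  if UniqueRoiNums.length = 1 then
    [ListToGroup]
  else
    -- buckets = {}; for r, x in zip(RoiNums, ListToGroup): buckets.setdefault(r, []).append(x)
    let buckets : PySem.Dict Int (List Int) :=
      (RoiNums.zip ListToGroup).foldl
        (fun d p => PySem.Dict.modify d p.1 [] (fun l => l ++ [p.2])) PySem.Dict.empty
    UniqueRoiNums.map (fun r => PySem.Dict.getD buckets r [])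

-- ===== PRECONDITION & SPEC =====
-- Pre_ is exactly where the Python A returns: it excludes the IndexError inputs
-- (some DIV is empty, or ≥2 distinct ROI numbers while ListToGroup is longer than DIVs).
def Pre_GroupListByRoi (ListToGroup : List Int) (DIVs : List (List Int)) : Prop :=
  (∀ d ∈ DIVs, d ≠ []) ∧
  ((∀ d ∈ DIVs, PySem.List.pyGetD d 0 0 = PySem.List.pyGetD (DIVs.headD []) 0 0) ∨
    ListToGroup.length ≤ DIVs.length)
instance (ListToGroup : List Int) (DIVs : List (List Int)) : Decidable (Pre_GroupListByRoi ListToGroup DIVs) := by unfold Pre_GroupListByRoi; infer_instance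

def pvWitness_GroupListByRoi : List Int × List (List Int) := ([10, 20, 30], [[1, 5], [2, 6], [1, 7]])

def Spec_GroupListByRoi (ListToGroup : List Int) (DIVs : List (List Int)) (out : List (List Int)) : Prop := out = GroupListByRoi_alt ListToGroup DIVs
instance (ListToGroup : List Int) (DIVs : List (List Int)) (out : List (List Int)) : Decidable (Spec_GroupListByRoi ListToGroup DIVs out) := by unfold Spec_GroupListByRoi; infer_instance

-- ===== CLAIM (what is proved, stated in full; the proofs are below) =====
def Claim_equal_GroupListByRoi : Prop := ∀ (ListToGroup : List Int) (DIVs : List (List Int)), Dom_GroupListByRoi ListToGroup DIVs → Pre_GroupListByRoi ListToGroup DIVs → Spec_GroupListByRoi ListToGroup DIVs (GroupListByRoi ListToGroup DIVs)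

-- ===== LEMMAS AND PROOFS =====

-- A nodup list all of whose elements are equal has at most one element.
lemma nodup_const_length_le {c : Int} : ∀ (s : List Int), s.Nodup → (∀ x ∈ s, x = c) → s.length ≤ 1 := by
  intro s hnd hall
  match s with
  | [] => simp
  | [a] => simp
  | a :: b :: t =>
    exfalso
    have ha : a = c := hall a (by simp)
    have hb : b = c := hall b (by simp)
    have : a ≠ b := by
      have := List.Pairwise.of_cons hnd
      exact (List.pairwise_cons.mp hnd).1 b (by simp)
    exact this (ha.trans hb.symm)

-- The index loop of A reads off exactly the (head, element) pairs of the zip.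
lemma zs_eq (L : List Int) (D : List (List Int)) (h : L.length ≤ D.length) :
    (PySem.List.pyRange 0 (L.length : Int) 1).map
      (fun i => (PySem.List.pyGetD (PySem.List.pyGetD D i []) 0 0, PySem.List.pyGetD L i 0))
    = (D.map (fun d => PySem.List.pyGetD d 0 0)).zip L := by
  rw [PySem.List.pyRange_zero_natCast, List.map_map]
  apply List.ext_getElem
  · simp; omega
  · intro i h1 h2
    simp only [List.getElem_map, List.getElem_range, Function.comp_apply, List.getElem_zip]
    have hiL : i < L.length := by simpa using h1
    have hiD : i < D.length := lt_of_lt_of_le hiL h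
    rw [PySem.List.pyGetD_natCast, PySem.List.pyGetD_natCast,
        List.getD_eq_getElem L 0 hiL, List.getD_eq_getElem D [] hiD]

-- Per ROI number, A's rescan equals B's bucket.
lemma inner_eq (L : List Int) (D : List (List Int)) (h : L.length ≤ D.length) (r : Int) :
    (PySem.List.pyRange 0 (L.length : Int) 1).foldl
      (fun lst i =>
        if PySem.List.pyGetD (PySem.List.pyGetD D i []) 0 0 == r then
          lst ++ [PySem.List.pyGetD L i 0]
        else lst) []
    = PySem.Dict.getD
        (((D.map (fun d => PySem.List.pyGetD d 0 0)).zip L).foldl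
          (fun d p => PySem.Dict.modify d p.1 [] (fun l => l ++ [p.2])) PySem.Dict.empty) r [] := by
  have e1 : (PySem.List.pyRange 0 (L.length : Int) 1).foldl
      (fun lst i =>
        if PySem.List.pyGetD (PySem.List.pyGetD D i []) 0 0 == r then
          lst ++ [PySem.List.pyGetD L i 0]
        else lst) []
      = ((PySem.List.pyRange 0 (L.length : Int) 1).map
          (fun i => (PySem.List.pyGetD (PySem.List.pyGetD D i []) 0 0, PySem.List.pyGetD L i 0))).foldl
          (fun lst p => if p.1 == r then lst ++ [p.2] else lst) [] :=
    by rw [List.foldl_map]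
  rw [e1, zs_eq L D h, PySem.List.foldl_append_if, List.nil_append,
      PySem.Dict.getD_foldl_modify_append, PySem.Dict.getD_empty, List.nil_append]

-- ===== VERDICT (by name: the statement is the Claim_ definition above) =====
theorem GroupListByRoi_spec : Claim_equal_GroupListByRoi := by
  intro L D _ hpre
  unfold Spec_GroupListByRoi GroupListByRoi GroupListByRoi_alt
  rw [PySem.List.foldl_append_singleton_eq_map, List.nil_append]
  by_cases hone : (PySem.Set.ofList (D.map (fun d => PySem.List.pyGetD d 0 0))).length = 1
  · simp only [hone, if_true]
  · simp only [if_neg hone]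
    rcases hpre.2 with hall | hlen
    · -- all heads equal: the set has ≤ 1 element, hence 0, hence DIVs = []
      have hle : (PySem.Set.ofList (D.map (fun d => PySem.List.pyGetD d 0 0))).length ≤ 1 := by
        apply nodup_const_length_le _ (PySem.Set.nodup_ofList _)
        intro x hx
        rw [PySem.Set.mem_ofList] at hx
        rcases List.mem_map.mp hx with ⟨d, hd, rfl⟩
        exact hall d hd
      have h0 : (PySem.Set.ofList (D.map (fun d => PySem.List.pyGetD d 0 0))) = [] := by
        cases hs : (PySem.Set.ofList (D.map (fun d => PySem.List.pyGetD d 0 0))) with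
        | nil => rfl
        | cons a t => rw [hs] at hle hone; simp at hle; simp [hle] at hone
      rw [h0]; simp
    · rw [PySem.List.foldl_append_singleton_eq_map, List.nil_append]
      apply List.map_congr_left
      intro r _
      exact inner_eq L D hlen r
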